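-- pv_equiv track=rewrite | github.com/Aasthaengg/IBMdataset | Python_codes/p03665/s601064316.py | solve
-- ===== SOURCE A (Python) =====
-- from collections import Counter
--
-- def binom_64bit(n):
--     c = [1 for i in range(n+1)]
--     for k in range(1, n):
--         c[k] = c[k-1] * (n-k+1) // k
--     return c
--
-- def solve(N, P, A):
--     B = Counter([a % 2 for a in A])
--     C0 = binom_64bit(B[0])
--     C1 = binom_64bit(B[1])
--     ans = 0
--     if P == 1:
--         for i in range(0, B[0]+1):
--             for j in range(1, B[1]+1, 2):
--                 ans += C0[i] * C1[j]
--     else: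
--         for i in range(0, B[0]+1):
--             for j in range(0, B[1]+1, 2):
--                 ans += C0[i] * C1[j]
--     return ans
-- ===== SOURCE B (Python) =====
-- def solve(N, P, A):
--     # Closed form: summing C(B0,i) over all i gives 2**B0; summing C(B1,j) over
--     # odd (resp. even) j gives 2**(B1-1) when B1 >= 1, and 0 (resp. 1) when B1 == 0.
--     odd = sum(1 for a in A if a % 2)
--     even = len(A) - odd
--     if odd:
--         half = 1 << (odd - 1)
--     else:
--         half = 0 if P == 1 else 1
--     return (1 << even) * half
-- ===== Notes on version B (the rewrite author's own statement) =====
-- stated objective: faster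
-- what changed: Replaces the binomial-table construction and the O(B0*B1) double summation loop with the closed form 2^even * 2^(odd-1) (or 0/1 when there are no odd elements), derived from the binomial-sum identities.
import Mathlib
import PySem

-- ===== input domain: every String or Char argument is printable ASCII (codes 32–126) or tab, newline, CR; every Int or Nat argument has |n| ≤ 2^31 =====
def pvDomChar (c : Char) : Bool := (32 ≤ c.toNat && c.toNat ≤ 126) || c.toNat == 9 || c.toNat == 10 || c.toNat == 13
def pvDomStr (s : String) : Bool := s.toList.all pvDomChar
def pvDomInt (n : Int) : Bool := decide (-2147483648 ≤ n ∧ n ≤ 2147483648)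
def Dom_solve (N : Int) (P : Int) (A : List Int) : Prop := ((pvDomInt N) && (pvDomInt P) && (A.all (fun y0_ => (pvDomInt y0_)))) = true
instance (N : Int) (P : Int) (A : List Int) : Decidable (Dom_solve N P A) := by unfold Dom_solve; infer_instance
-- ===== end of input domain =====

-- B replaces A's binomial table and O(B0*B1) double summation loop by the closed form
-- 2^even * 2^(odd-1) (0/1 when no odd element), from the binomial-sum identities; return value only.

-- ===== PORT A =====
-- binom_64bit: c = [1]*(n+1); for k in range(1, n): c[k] = c[k-1]*(n-k+1)//k; return c.
-- '[1 for i in range(n+1)]' has max(n+1, 0) elements, i.e. (n+1).toNat.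
-- The assignment c[k] = v is List.set k.toNat v: k comes from range(1, n), so k ≥ 1 and
-- toNat is exact; the read c[k-1] has 0 ≤ k-1 < len(c), so pyGetD _ _ 0 is exact there.
def binom_64bit (n : Int) : List Int :=
  (PySem.List.pyRange 1 n 1).foldl
    (fun c k => c.set k.toNat (PySem.Int.floordiv (PySem.List.pyGetD c (k - 1) 0 * (n - k + 1)) k))
    (List.replicate (n + 1).toNat 1)

-- Counter([a % 2 for a in A]) is PySem.Dict.counter; B[0]/B[1] on a Counter return the count,
-- 0 when the key is absent, i.e. getD _ 0.  The reads C0[i] (0 ≤ i ≤ B[0]) and C1[j]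
-- (0 ≤ j ≤ B[1]) are always in range (len = B[_]+1), so pyGetD _ _ 0 is exact for them.
def solve (N : Int) (P : Int) (A : List Int) : Int :=
  let B := PySem.Dict.counter (A.map (fun a => PySem.Int.mod a 2))
  let C0 := binom_64bit (B.getD 0 0)
  let C1 := binom_64bit (B.getD 1 0)
  if P = 1 then
    (PySem.List.pyRange 0 (B.getD 0 0 + 1) 1).foldl
      (fun ans i =>
        (PySem.List.pyRange 1 (B.getD 1 0 + 1) 2).foldl
          (fun ans j => ans + PySem.List.pyGetD C0 i 0 * PySem.List.pyGetD C1 j 0) ans) 0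
  else
    (PySem.List.pyRange 0 (B.getD 0 0 + 1) 1).foldl
      (fun ans i =>
        (PySem.List.pyRange 0 (B.getD 1 0 + 1) 2).foldl
          (fun ans j => ans + PySem.List.pyGetD C0 i 0 * PySem.List.pyGetD C1 j 0) ans) 0

-- ===== PORT B =====
-- 'if a % 2' is truthiness: mod a 2 ≠ 0.  '1 << e' is 2 ^ e (both shift amounts are ≥ 0).
def solve_alt (N : Int) (P : Int) (A : List Int) : Int :=
  let odd : Int := ((A.filter (fun a => PySem.Int.mod a 2 != 0)).length : Int)
  let even : Int := (A.length : Int) - odd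
  let half : Int := if odd ≠ 0 then 2 ^ (odd - 1).toNat else if P = 1 then 0 else 1
  2 ^ even.toNat * half

-- ===== PRECONDITION & SPEC =====
def Spec_solve (N : Int) (P : Int) (A : List Int) (out : Int) : Prop := out = solve_alt N P A
instance (N : Int) (P : Int) (A : List Int) (out : Int) : Decidable (Spec_solve N P A out) := by unfold Spec_solve; infer_instance

-- ===== CLAIM (what is proved, stated in full; the proofs are below) =====
def Claim_equal_solve : Prop := ∀ (N : Int) (P : Int) (A : List Int), Dom_solve N P A → Spec_solve N P A (solve N P A)

-- ===== LEMMAS AND PROOFS =====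

-- the intended content of binom_64bit m: the binomial coefficients C(m, 0..m), as Ints
def chooseList (m : Nat) : List Int :=
  (List.range (m + 1)).map (fun k => ((m.choose k : Nat) : Int))

lemma chooseList_length (m : Nat) : (chooseList m).length = m + 1 := by
  simp [chooseList]

-- loop invariant for binom_64bit's fold: after processing k = 1..t, entries 0..t hold C(m,·)
lemma binom_loop (m : Nat) : ∀ (t : Nat), t ≤ m →
    (PySem.List.pyRange 1 ((t : Int) + 1) 1).foldl
      (fun c k => c.set k.toNat
        (PySem.Int.floordiv (PySem.List.pyGetD c (k - 1) 0 * ((m : Int) - k + 1)) k))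
      (List.replicate (m + 1) 1)
    = (List.range (m + 1)).map (fun k => if k ≤ t then ((m.choose k : Nat) : Int) else 1) := by
  intro t
  induction t with
  | zero =>
    intro _
    rw [PySem.List.pyRange_one_eq_nil (by norm_num)]
    simp only [List.foldl_nil]
    apply List.ext_getElem (by simp)
    intro i h1 h2
    simp only [List.getElem_map, List.getElem_range, List.getElem_replicate]
    rcases Nat.eq_zero_or_pos i with h | h
    · subst h; simp
    · rw [if_neg (by omega)]
  | succ t ih =>
    intro ht
    have ht' : t ≤ m := by omega
    have hsplit : (PySem.List.pyRange 1 (((t + 1 : Nat) : Int) + 1) 1)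
        = PySem.List.pyRange 1 ((t : Int) + 1) 1 ++ [(t : Int) + 1] := by
      have h := PySem.List.pyRange_one_succ_right (a := 1) (b := (t : Int) + 1) (by omega)
      have hb : (((t + 1 : Nat)) : Int) + 1 = ((t : Int) + 1) + 1 := by push_cast; ring
      rw [hb]; exact h
    rw [hsplit, List.foldl_append, ih ht']
    simp only [List.foldl_cons, List.foldl_nil]
    -- the read: c[t] = C(m, t)
    have hread : PySem.List.pyGetD
        ((List.range (m + 1)).map (fun k => if k ≤ t then ((m.choose k : Nat) : Int) else 1))
        ((t : Int) + 1 - 1) 0 = ((m.choose t : Nat) : Int) := by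
      have hidx : ((t : Int) + 1 - 1) = ((t : Nat) : Int) := by ring
      rw [hidx, PySem.List.pyGetD_natCast,
        PySem.List.getD_map_range _ _ _ _ (by omega)]
      simp
    rw [hread]
    -- the written value: C(m,t) * (m - t) // (t+1) = C(m, t+1)
    have hval : PySem.Int.floordiv (((m.choose t : Nat) : Int) * ((m : Int) - ((t : Int) + 1) + 1))
        ((t : Int) + 1) = ((m.choose (t + 1) : Nat) : Int) := by
      have h1 : ((m : Int) - ((t : Int) + 1) + 1) = (((m - t : Nat)) : Int) := by
        push_cast [Nat.cast_sub ht']; ring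
      have h2 : ((m.choose t : Nat) : Int) * ((m - t : Nat) : Int)
          = ((m.choose t * (m - t) : Nat) : Int) := by push_cast; ring
      have h3 : ((t : Int) + 1) = (((t + 1 : Nat)) : Int) := by push_cast; ring
      rw [h1, h2, h3, PySem.Int.floordiv_natCast]
      rw [← Nat.choose_succ_right_eq m t, Nat.mul_div_cancel _ (by omega)]
    rw [hval]
    -- the write: setting index t+1
    have hidx : ((t : Int) + 1).toNat = t + 1 := by omega
    rw [hidx]
    apply List.ext_getElem (by simp)
    intro i h1 h2
    rw [List.getElem_set]
    simp only [List.getElem_map, List.getElem_range] at h2 ⊢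
    by_cases he : t + 1 = i
    · rw [if_pos he, if_pos (by omega)]
      subst he; rfl
    · rw [if_neg he]
      by_cases hle : i ≤ t
      · rw [if_pos hle, if_pos (by omega)]
      · rw [if_neg hle, if_neg (by omega)]

-- binom_64bit on a natural argument computes the binomial row
lemma binom_eq (m : Nat) : binom_64bit (m : Int) = chooseList m := by
  unfold binom_64bit chooseList
  have hrep : ((m : Int) + 1).toNat = m + 1 := by omega
  rw [hrep]
  rcases Nat.eq_zero_or_pos m with h | h
  · subst h
    rw [PySem.List.pyRange_one_eq_nil (by norm_num)]
    simp
  · have hm : (m : Int) = ((m - 1 : Nat) : Int) + 1 := by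
      push_cast [Nat.cast_sub h]; ring
    nth_rewrite 2 [hm]
    rw [binom_loop m (m - 1) (by omega)]
    apply List.ext_getElem (by simp)
    intro i h1 h2
    simp only [List.getElem_map, List.getElem_range]
    simp only [List.length_map, List.length_range] at h1
    split_ifs with hle
    · rfl
    · have : i = m := by omega
      subst this; simp

-- List.range sums are Finset.range sums
lemma sum_map_range (f : Nat → Int) (n : Nat) :
    ((List.range n).map f).sum = ∑ i ∈ Finset.range n, f i := by
  induction n with
  | zero => simp
  | succ n ih => rw [List.range_succ, Finset.sum_range_succ]; simp [ih]

-- a sum over range n splits into its even-index and odd-index parts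
lemma sum_range_parity (f : Nat → Int) (n : Nat) :
    ∑ i ∈ Finset.range n, f i
      = (∑ k ∈ Finset.range ((n + 1) / 2), f (2 * k))
        + ∑ k ∈ Finset.range (n / 2), f (2 * k + 1) := by
  induction n with
  | zero => simp
  | succ n ih =>
    rcases Nat.even_or_odd n with ⟨t, htn⟩ | ⟨t, htn⟩
    · subst htn
      rw [Finset.sum_range_succ, ih,
        show (t + t + 1 + 1) / 2 = t + 1 from by omega,
        show (t + t + 1) / 2 = t from by omega,
        show (t + t) / 2 = t from by omega]
      have he : ∑ k ∈ Finset.range (t + 1), f (2 * k)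
          = (∑ k ∈ Finset.range t, f (2 * k)) + f (2 * t) := Finset.sum_range_succ _ t
      rw [he, show 2 * t = t + t from by ring]
      ring
    · subst htn
      rw [Finset.sum_range_succ, ih,
        show (2 * t + 1 + 1 + 1) / 2 = t + 1 from by omega,
        show (2 * t + 1 + 1) / 2 = t + 1 from by omega,
        show (2 * t + 1) / 2 = t from by omega]
      have ho : ∑ k ∈ Finset.range (t + 1), f (2 * k + 1)
          = (∑ k ∈ Finset.range t, f (2 * k + 1)) + f (2 * t + 1) := Finset.sum_range_succ _ t
      rw [ho]
      ring

-- even-index and odd-index binomial sums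
lemma sum_choose_even_odd (m : Nat) :
    (∑ k ∈ Finset.range ((m + 2) / 2), ((m.choose (2 * k) : Nat) : Int))
      = (if m = 0 then 1 else 2 ^ (m - 1))
    ∧ (∑ k ∈ Finset.range ((m + 1) / 2), ((m.choose (2 * k + 1) : Nat) : Int))
      = (if m = 0 then 0 else 2 ^ (m - 1)) := by
  have htot : ∑ i ∈ Finset.range (m + 1), ((m.choose i : Nat) : Int) = 2 ^ m := by
    exact_mod_cast Nat.sum_range_choose m
  have hidx : (m + 1 + 1) / 2 = (m + 2) / 2 := by omega
  have hsplit1 : (∑ k ∈ Finset.range ((m + 2) / 2), ((m.choose (2 * k) : Nat) : Int))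
      + (∑ k ∈ Finset.range ((m + 1) / 2), ((m.choose (2 * k + 1) : Nat) : Int))
      = 2 ^ m := by
    rw [← htot, sum_range_parity (fun i => ((m.choose i : Nat) : Int)) (m + 1), hidx]
  have hsplit2 : (∑ k ∈ Finset.range ((m + 2) / 2), ((m.choose (2 * k) : Nat) : Int))
      - (∑ k ∈ Finset.range ((m + 1) / 2), ((m.choose (2 * k + 1) : Nat) : Int))
      = (if m = 0 then 1 else 0) := by
    have halt : ∑ i ∈ Finset.range (m + 1), ((-1 : Int) ^ i * (m.choose i : Int))
        = (if m = 0 then 1 else 0) := Int.alternating_sum_range_choose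
    rw [← halt, sum_range_parity (fun i => ((-1 : Int) ^ i * (m.choose i : Int))) (m + 1), hidx]
    have h1 : ∑ k ∈ Finset.range ((m + 2) / 2), ((-1 : Int) ^ (2 * k) * (m.choose (2 * k) : Int))
        = ∑ k ∈ Finset.range ((m + 2) / 2), ((m.choose (2 * k) : Nat) : Int) :=
      Finset.sum_congr rfl (fun k _ => by rw [pow_mul]; norm_num)
    have h2 : ∑ k ∈ Finset.range ((m + 1) / 2),
          ((-1 : Int) ^ (2 * k + 1) * (m.choose (2 * k + 1) : Int))
        = -∑ k ∈ Finset.range ((m + 1) / 2), ((m.choose (2 * k + 1) : Nat) : Int) := by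
      rw [← Finset.sum_neg_distrib]
      exact Finset.sum_congr rfl (fun k _ => by rw [pow_succ, pow_mul]; norm_num)
    rw [h1, h2]
    ring
  rcases Nat.eq_zero_or_pos m with h | h
  · subst h
    constructor
    · simp
    · simp
  · rw [if_neg (by omega)] at hsplit2
    rw [if_neg (by omega), if_neg (by omega)]
    have hpow : (2 : Int) ^ m = 2 ^ (m - 1) + 2 ^ (m - 1) := by
      have hm1 : m - 1 + 1 = m := by omega
      calc (2 : Int) ^ m = 2 ^ (m - 1 + 1) := by rw [hm1]
        _ = 2 ^ (m - 1) + 2 ^ (m - 1) := by rw [pow_succ]; ring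
    constructor <;> linarith [hsplit1, hsplit2]

-- i-loop: summing the whole binomial row gives 2^m
lemma sum_row (m : Nat) :
    ((PySem.List.pyRange 0 ((m : Int) + 1) 1).map
      (fun i => PySem.List.pyGetD (chooseList m) i 0)).sum = 2 ^ m := by
  have hlen : ((m : Int) + 1) = ((chooseList m).length : Int) := by
    rw [chooseList_length]; push_cast; ring
  rw [hlen, PySem.List.map_pyGetD_pyRange_zero']
  unfold chooseList
  rw [sum_map_range]
  exact_mod_cast Nat.sum_range_choose m

-- helper: a step-2 pyRange as a mapped List.range
lemma pyRange_two (a b : Int) :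
    PySem.List.pyRange a b 2
      = (List.range (if a < b then ((b - a + 2 - 1) / 2).toNat else 0)).map
          (fun (k : Nat) => a + 2 * (k : Int)) := by
  rw [PySem.List.pyRange_of_pos a b (by norm_num)]

-- j-loop, P == 1: summing the odd-index entries
lemma sum_row_odd (m : Nat) :
    ((PySem.List.pyRange 1 ((m : Int) + 1) 2).map
      (fun j => PySem.List.pyGetD (chooseList m) j 0)).sum
    = (if m = 0 then 0 else 2 ^ (m - 1)) := by
  rw [pyRange_two]
  have hn : (if (1 : Int) < (m : Int) + 1 then (((m : Int) + 1 - 1 + 2 - 1) / 2).toNat else 0)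
      = (m + 1) / 2 := by
    split_ifs with h
    · omega
    · omega
  rw [hn, List.map_map]
  have hpt : ∀ k ∈ List.range ((m + 1) / 2),
      ((fun j => PySem.List.pyGetD (chooseList m) j 0) ∘ (fun k : Nat => (1 : Int) + 2 * (k : Int))) k
        = ((m.choose (2 * k + 1) : Nat) : Int) := by
    intro k hk
    rw [List.mem_range] at hk
    simp only [Function.comp]
    have hc : ((1 : Int) + 2 * (k : Int)) = (((2 * k + 1 : Nat)) : Int) := by push_cast; ring
    simp only [hc, PySem.List.pyGetD_natCast]
    unfold chooseList
    rw [PySem.List.getD_map_range _ _ _ _ (by omega)]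
  rw [List.map_congr_left hpt, sum_map_range]
  exact (sum_choose_even_odd m).2

-- j-loop, P != 1: summing the even-index entries
lemma sum_row_even (m : Nat) :
    ((PySem.List.pyRange 0 ((m : Int) + 1) 2).map
      (fun j => PySem.List.pyGetD (chooseList m) j 0)).sum
    = (if m = 0 then 1 else 2 ^ (m - 1)) := by
  rw [pyRange_two]
  have hn : (if (0 : Int) < (m : Int) + 1 then (((m : Int) + 1 - 0 + 2 - 1) / 2).toNat else 0)
      = (m + 2) / 2 := by
    rw [if_pos (by positivity)]; omega
  rw [hn, List.map_map]
  have hpt : ∀ k ∈ List.range ((m + 2) / 2),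
      ((fun j => PySem.List.pyGetD (chooseList m) j 0) ∘ (fun k : Nat => (0 : Int) + 2 * (k : Int))) k
        = ((m.choose (2 * k) : Nat) : Int) := by
    intro k hk
    rw [List.mem_range] at hk
    simp only [Function.comp]
    have hc : ((0 : Int) + 2 * (k : Int)) = (((2 * k : Nat)) : Int) := by push_cast; ring
    simp only [hc, PySem.List.pyGetD_natCast]
    unfold chooseList
    rw [PySem.List.getD_map_range _ _ _ _ (by omega)]
  rw [List.map_congr_left hpt, sum_map_range]
  exact (sum_choose_even_odd m).1

-- the double loop is the product of the two sums
lemma double_loop (l0 l1 : List Int) (C0 C1 : List Int) :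
    l0.foldl (fun ans i => l1.foldl
        (fun ans j => ans + PySem.List.pyGetD C0 i 0 * PySem.List.pyGetD C1 j 0) ans) 0
      = (l0.map (fun i => PySem.List.pyGetD C0 i 0)).sum
        * (l1.map (fun j => PySem.List.pyGetD C1 j 0)).sum := by
  have hcongr : l0.foldl (fun ans i => l1.foldl
        (fun ans j => ans + PySem.List.pyGetD C0 i 0 * PySem.List.pyGetD C1 j 0) ans) 0
      = l0.foldl (fun ans i => ans + PySem.List.pyGetD C0 i 0
          * (l1.map (fun j => PySem.List.pyGetD C1 j 0)).sum) 0 := by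
    apply PySem.List.foldl_congr_mem
    intro ans i _
    rw [PySem.List.foldl_add l1 (fun j => PySem.List.pyGetD C0 i 0 * PySem.List.pyGetD C1 j 0) ans,
      List.sum_map_mul_left]
  rw [hcongr,
    PySem.List.foldl_add l0
      (fun i => PySem.List.pyGetD C0 i 0 * (l1.map (fun j => PySem.List.pyGetD C1 j 0)).sum) 0,
    List.sum_map_mul_right]
  ring

-- each parity list entry is 0 or 1, so the two counts partition the length
lemma count_parity_sum (A : List Int) :
    (A.map (fun a => PySem.Int.mod a 2)).count 0
      + (A.map (fun a => PySem.Int.mod a 2)).count 1 = A.length := by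
  induction A with
  | nil => simp
  | cons a l ih =>
    rcases PySem.Int.mod_two_eq a with h | h
    · simp only [List.map_cons, List.count_cons, List.length_cons, h,
        show ((0 : Int) == 0) = true from by decide,
        show ((0 : Int) == 1) = false from by decide, if_true]
      rw [if_neg Bool.false_ne_true]
      omega
    · simp only [List.map_cons, List.count_cons, List.length_cons, h,
        show ((1 : Int) == 0) = false from by decide,
        show ((1 : Int) == 1) = true from by decide, if_true]
      rw [if_neg Bool.false_ne_true]
      omega

-- parity counts: the Counter entries of [a % 2 for a in A]
lemma count_parities (A : List Int) :
    (A.map (fun a => PySem.Int.mod a 2)).count 0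
      = A.length - (A.filter (fun a => PySem.Int.mod a 2 != 0)).length
    ∧ (A.map (fun a => PySem.Int.mod a 2)).count 1
      = (A.filter (fun a => PySem.Int.mod a 2 != 0)).length := by
  have h1 : (A.map (fun a => PySem.Int.mod a 2)).count 1
      = (A.filter (fun a => PySem.Int.mod a 2 != 0)).length := by
    rw [List.count_eq_countP', List.countP_map]
    simp only [← List.countP_eq_length_filter]
    apply List.countP_congr
    intro a _
    rcases PySem.Int.mod_two_eq a with h | h <;>
      simp only [Function.comp_apply, h] <;> decide
  have hsum := count_parity_sum A
  refine ⟨by omega, h1⟩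

-- ===== VERDICT (by name: the statement is the Claim_ definition above) =====
theorem solve_spec : Claim_equal_solve := by
  intro N P A _
  unfold Spec_solve
  obtain ⟨h0, h1⟩ := count_parities A
  simp only [solve, solve_alt, PySem.Dict.getD_counter, h0, h1]
  set odd : Nat := (A.filter (fun a => PySem.Int.mod a 2 != 0)).length with hodd
  have hole : odd ≤ A.length := by
    rw [hodd]
    exact List.length_filter_le _ _
  set m0 : Nat := A.length - odd with hm0
  have heven : ((A.length : Int) - ((odd : Nat) : Int)).toNat = m0 := by omega
  have hoddm1 : (((odd : Nat) : Int) - 1).toNat = odd - 1 := by omega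
  rw [binom_eq m0, binom_eq odd, heven, hoddm1]
  by_cases hP : P = 1
  · rw [if_pos hP, double_loop, sum_row m0, sum_row_odd odd]
    by_cases ho : odd = 0
    · simp [ho, hP]
    · rw [if_neg ho, if_pos (Int.natCast_ne_zero.mpr ho)]
  · rw [if_neg hP, double_loop, sum_row m0, sum_row_even odd]
    by_cases ho : odd = 0
    · simp [ho, hP]
    · rw [if_neg ho, if_pos (Int.natCast_ne_zero.mpr ho)]
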